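-- pv_equiv track=rewrite | github.com/hyastar/learn | test/YTU/ytu.py | sencode
-- ===== SOURCE A (Python) =====
-- def ordat(msg, idx):
--     return ord(msg[idx]) if idx < len(msg) else 0
--
-- def sencode(msg, key):
--     l = len(msg)
--     pwd = []
--     for i in range(0, l, 4):
--         pwd.append(
--             ordat(msg, i)
--             | ordat(msg, i + 1) << 8
--             | ordat(msg, i + 2) << 16
--             | ordat(msg, i + 3) << 24
--         )
--     if key:
--         pwd.append(l)
--     return pwd
-- ===== SOURCE B (Python) =====
-- def sencode(msg, key):
--     pwd = []
--     word = 0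
--     for i, c in enumerate(msg):
--         word |= ord(c) << (8 * (i % 4))
--         if i % 4 == 3:
--             pwd.append(word)
--             word = 0
--     if len(msg) % 4 != 0:
--         pwd.append(word)
--     if key:
--         pwd.append(len(msg))
--     return pwd
-- ===== Notes on version B (the rewrite author's own statement) =====
-- stated objective: simpler
-- what changed: Replaces A's stride-4 index loop with its bounds-checking ordat(msg, i) helper by a single pass over the characters themselves, ORing each byte into an accumulator word and flushing it every fourth character (plus a final partial-word flush), so no helper and no out-of-range indexing are needed.
import Mathlib
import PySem

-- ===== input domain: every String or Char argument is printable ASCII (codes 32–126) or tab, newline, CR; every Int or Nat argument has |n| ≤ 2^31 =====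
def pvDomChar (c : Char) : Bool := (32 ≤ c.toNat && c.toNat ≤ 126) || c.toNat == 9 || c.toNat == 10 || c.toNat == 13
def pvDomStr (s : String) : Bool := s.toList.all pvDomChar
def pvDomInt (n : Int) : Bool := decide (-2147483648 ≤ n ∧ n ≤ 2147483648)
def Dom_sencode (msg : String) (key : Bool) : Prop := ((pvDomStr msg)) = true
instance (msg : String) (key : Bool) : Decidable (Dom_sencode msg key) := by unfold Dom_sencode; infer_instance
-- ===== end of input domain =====

-- B replaces A's stride-4 index loop (with an out-of-bounds-checking `ordat` helper) by a single
-- pass over the characters that ORs each byte into an accumulator word and flushes every 4th char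
-- (objective: simpler, same O(n) cost).

-- ===== PORT A =====
def ordat (msg : String) (idx : Int) : Int :=
  if idx < PySem.Str.len msg then
    -- `ord(msg[idx])`: ordat is only ever called with 0 ≤ idx, so pyGet? is `some` here;
    -- the `none` branch is unreachable.
    match PySem.Str.pyGet? msg idx with
    | some c => (c.toNat : Int)
    | none => 0
  else 0

def sencode (msg : String) (key : Bool) : List Int :=
  let l := PySem.Str.len msg
  let pwd : List Int := (PySem.List.pyRange 0 l 4).foldl
    (fun pwd i => pwd ++
      [PySem.Int.bor (PySem.Int.bor (PySem.Int.bor (ordat msg i)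
          ((ordat msg (i + 1)) <<< (8 : Nat)))
          ((ordat msg (i + 2)) <<< (16 : Nat)))
          ((ordat msg (i + 3)) <<< (24 : Nat))]) []
  if key then pwd ++ [l] else pwd

-- ===== PORT B =====
def sencode_alt (msg : String) (key : Bool) : List Int :=
  let step : (List Int × Int × Nat) → Char → (List Int × Int × Nat) := fun st c =>
    let word := PySem.Int.bor st.2.1 (((c.toNat : Int)) <<< (8 * (st.2.2 % 4)))
    if st.2.2 % 4 == 3 then (st.1 ++ [word], 0, st.2.2 + 1) else (st.1, word, st.2.2 + 1)
  let st := msg.toList.foldl step ([], 0, 0)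
  let pwd := if msg.toList.length % 4 ≠ 0 then st.1 ++ [st.2.1] else st.1
  if key then pwd ++ [PySem.Str.len msg] else pwd

-- ===== PRECONDITION & SPEC =====
def Spec_sencode (msg : String) (key : Bool) (out : List Int) : Prop := out = sencode_alt msg key
instance (msg : String) (key : Bool) (out : List Int) : Decidable (Spec_sencode msg key out) := by unfold Spec_sencode; infer_instance

-- ===== CLAIM (what is proved, stated in full; the proofs are below) =====
def Claim_equal_sencode : Prop := ∀ (msg : String) (key : Bool), Dom_sencode msg key → Spec_sencode msg key (sencode msg key)

-- ===== LEMMAS AND PROOFS =====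

-- byte value of a character list at a Nat index, 0 past the end
def pvByte (cs : List Char) (n : Nat) : Int := (cs[n]?.map (fun c => (c.toNat : Int))).getD 0

-- the common chunked form both ports compute
def pvChunks : List Char → List Int
  | [] => []
  | a :: b :: c :: d :: rest =>
      PySem.Int.bor (PySem.Int.bor (PySem.Int.bor ((a.toNat : Int))
        (((b.toNat : Int)) <<< (8 : Nat))) (((c.toNat : Int)) <<< (16 : Nat)))
        (((d.toNat : Int)) <<< (24 : Nat)) :: pvChunks rest
  | [a] => [((a.toNat : Int))]
  | [a, b] => [PySem.Int.bor ((a.toNat : Int)) (((b.toNat : Int)) <<< (8 : Nat))]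
  | [a, b, c] => [PySem.Int.bor (PySem.Int.bor ((a.toNat : Int))
      (((b.toNat : Int)) <<< (8 : Nat))) (((c.toNat : Int)) <<< (16 : Nat))]

theorem ordat_eq_byte (msg : String) (i : Int) (h : 0 ≤ i) :
    ordat msg i = pvByte msg.toList i.toNat := by
  obtain ⟨n, rfl⟩ := Int.eq_ofNat_of_zero_le h
  unfold ordat pvByte
  rw [PySem.Str.pyGet?_natCast, PySem.Str.len_eq, Int.toNat_natCast]
  by_cases hn : n < msg.toList.length
  · rw [if_pos (by exact_mod_cast hn), List.getElem?_eq_getElem hn]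
    rfl
  · rw [if_neg (by exact_mod_cast hn), List.getElem?_eq_none (by omega)]
    rfl

theorem byte_drop (cs : List Char) (m j : Nat) : pvByte (cs.drop m) j = pvByte cs (m + j) := by
  unfold pvByte
  rw [List.getElem?_drop]

-- A's loop body as a function of the index
def wordA (msg : String) (i : Int) : Int :=
  PySem.Int.bor (PySem.Int.bor (PySem.Int.bor (ordat msg i)
      ((ordat msg (i + 1)) <<< (8 : Nat)))
      ((ordat msg (i + 2)) <<< (16 : Nat)))
      ((ordat msg (i + 3)) <<< (24 : Nat))

theorem wordA_eq_bytes (msg : String) (m : Nat) :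
    wordA msg (m : Int) = PySem.Int.bor (PySem.Int.bor (PySem.Int.bor (pvByte msg.toList m)
      ((pvByte msg.toList (m + 1)) <<< (8 : Nat)))
      ((pvByte msg.toList (m + 2)) <<< (16 : Nat)))
      ((pvByte msg.toList (m + 3)) <<< (24 : Nat)) := by
  unfold wordA
  rw [ordat_eq_byte _ _ (by positivity), ordat_eq_byte _ _ (by positivity),
      ordat_eq_byte _ _ (by positivity), ordat_eq_byte _ _ (by positivity)]
  simp [show ((m : Int) + 1).toNat = m + 1 from by omega,
        show ((m : Int) + 2).toNat = m + 2 from by omega,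
        show ((m : Int) + 3).toNat = m + 3 from by omega]

theorem lemA_gen (msg : String) (e : List Char) (k : Nat)
    (he : e = msg.toList.drop (4 * k)) :
    (List.range ((e.length + 3) / 4)).map (fun j => wordA msg ((4 * (k + j) : Nat) : Int))
      = pvChunks e := by
  induction e using pvChunks.induct generalizing k with
  | case1 => simp [pvChunks]
  | case2 a b c d rest ih =>
      have hlen : ((a :: b :: c :: d :: rest).length + 3) / 4 = (rest.length + 3) / 4 + 1 := by
        simp; omega
      rw [hlen, List.range_succ_eq_map, List.map_cons, List.map_map]
      have hhead : wordA msg ((4 * (k + 0) : Nat) : Int)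
          = PySem.Int.bor (PySem.Int.bor (PySem.Int.bor ((a.toNat : Int))
              (((b.toNat : Int)) <<< (8 : Nat))) (((c.toNat : Int)) <<< (16 : Nat)))
              (((d.toNat : Int)) <<< (24 : Nat)) := by
        rw [wordA_eq_bytes, show 4 * (k + 0) = 4 * k from by ring]
        rw [show pvByte msg.toList (4 * k) = pvByte (a :: b :: c :: d :: rest) 0 from by
              rw [he]; exact (byte_drop msg.toList (4 * k) 0).symm]
        rw [show pvByte msg.toList (4 * k + 1) = pvByte (a :: b :: c :: d :: rest) 1 from by
              rw [he]; exact (byte_drop msg.toList (4 * k) 1).symm]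
        rw [show pvByte msg.toList (4 * k + 2) = pvByte (a :: b :: c :: d :: rest) 2 from by
              rw [he]; exact (byte_drop msg.toList (4 * k) 2).symm]
        rw [show pvByte msg.toList (4 * k + 3) = pvByte (a :: b :: c :: d :: rest) 3 from by
              rw [he]; exact (byte_drop msg.toList (4 * k) 3).symm]
        simp [pvByte]
      have hres : rest = List.drop (4 * (k + 1)) msg.toList := by
        rw [show 4 * (k + 1) = 4 * k + 4 from by ring, ← List.drop_drop, ← he]
        rfl
      have htail : (List.range ((rest.length + 3) / 4)).map
            ((fun j => wordA msg ((4 * (k + j) : Nat) : Int)) ∘ Nat.succ)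
          = pvChunks rest := by
        rw [show ((fun j => wordA msg ((4 * (k + j) : Nat) : Int)) ∘ Nat.succ)
            = (fun j => wordA msg ((4 * ((k + 1) + j) : Nat) : Int)) from by
          funext j
          simp only [Function.comp, Nat.succ_eq_add_one]
          rw [show 4 * (k + (j + 1)) = 4 * ((k + 1) + j) from by ring]]
        exact ih (k + 1) hres
      rw [hhead, htail, pvChunks]
  | case3 a =>
      simp only [List.length_cons, List.length_nil]
      rw [show (0 + 1 + 3) / 4 = 1 by norm_num]
      rw [show (List.range 1) = [0] from rfl, List.map_cons, List.map_nil]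
      rw [wordA_eq_bytes, show 4 * (k + 0) = 4 * k from by ring]
      rw [show pvByte msg.toList (4 * k) = pvByte [a] 0 from by
            rw [he]; exact (byte_drop msg.toList (4 * k) 0).symm]
      rw [show pvByte msg.toList (4 * k + 1) = pvByte [a] 1 from by
            rw [he]; exact (byte_drop msg.toList (4 * k) 1).symm]
      rw [show pvByte msg.toList (4 * k + 2) = pvByte [a] 2 from by
            rw [he]; exact (byte_drop msg.toList (4 * k) 2).symm]
      rw [show pvByte msg.toList (4 * k + 3) = pvByte [a] 3 from by
            rw [he]; exact (byte_drop msg.toList (4 * k) 3).symm]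
      simp [pvByte, pvChunks]
  | case4 a b =>
      simp only [List.length_cons, List.length_nil]
      rw [show (0 + 1 + 1 + 3) / 4 = 1 by norm_num]
      rw [show (List.range 1) = [0] from rfl, List.map_cons, List.map_nil]
      rw [wordA_eq_bytes, show 4 * (k + 0) = 4 * k from by ring]
      rw [show pvByte msg.toList (4 * k) = pvByte [a, b] 0 from by
            rw [he]; exact (byte_drop msg.toList (4 * k) 0).symm]
      rw [show pvByte msg.toList (4 * k + 1) = pvByte [a, b] 1 from by
            rw [he]; exact (byte_drop msg.toList (4 * k) 1).symm]
      rw [show pvByte msg.toList (4 * k + 2) = pvByte [a, b] 2 from by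
            rw [he]; exact (byte_drop msg.toList (4 * k) 2).symm]
      rw [show pvByte msg.toList (4 * k + 3) = pvByte [a, b] 3 from by
            rw [he]; exact (byte_drop msg.toList (4 * k) 3).symm]
      simp [pvByte, pvChunks]
  | case5 a b c =>
      simp only [List.length_cons, List.length_nil]
      rw [show (0 + 1 + 1 + 1 + 3) / 4 = 1 by norm_num]
      rw [show (List.range 1) = [0] from rfl, List.map_cons, List.map_nil]
      rw [wordA_eq_bytes, show 4 * (k + 0) = 4 * k from by ring]
      rw [show pvByte msg.toList (4 * k) = pvByte [a, b, c] 0 from by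
            rw [he]; exact (byte_drop msg.toList (4 * k) 0).symm]
      rw [show pvByte msg.toList (4 * k + 1) = pvByte [a, b, c] 1 from by
            rw [he]; exact (byte_drop msg.toList (4 * k) 1).symm]
      rw [show pvByte msg.toList (4 * k + 2) = pvByte [a, b, c] 2 from by
            rw [he]; exact (byte_drop msg.toList (4 * k) 2).symm]
      rw [show pvByte msg.toList (4 * k + 3) = pvByte [a, b, c] 3 from by
            rw [he]; exact (byte_drop msg.toList (4 * k) 3).symm]
      simp [pvByte, pvChunks]

theorem lemA (msg : String) :
    (PySem.List.pyRange 0 (PySem.Str.len msg) 4).foldl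
      (fun pwd i => pwd ++
        [PySem.Int.bor (PySem.Int.bor (PySem.Int.bor (ordat msg i)
            ((ordat msg (i + 1)) <<< (8 : Nat)))
            ((ordat msg (i + 2)) <<< (16 : Nat)))
            ((ordat msg (i + 3)) <<< (24 : Nat))]) []
    = pvChunks msg.toList := by
  rw [show (fun (pwd : List Int) (i : Int) => pwd ++
        [PySem.Int.bor (PySem.Int.bor (PySem.Int.bor (ordat msg i)
            ((ordat msg (i + 1)) <<< (8 : Nat)))
            ((ordat msg (i + 2)) <<< (16 : Nat)))
            ((ordat msg (i + 3)) <<< (24 : Nat))])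
      = (fun (pwd : List Int) (i : Int) => pwd ++ [wordA msg i]) from rfl]
  rw [PySem.List.foldl_append_singleton_eq_map (fun i => wordA msg i)]
  rw [PySem.Str.len_eq, PySem.List.pyRange_of_pos 0 (msg.toList.length : Int) (by norm_num),
      List.map_map]
  have hN : (if (0:Int) < (msg.toList.length : Int)
        then (((msg.toList.length : Int) - 0 + 4 - 1) / 4).toNat else 0)
      = (msg.toList.length + 3) / 4 := by
    split_ifs with h0 <;> omega
  rw [hN]
  simp only [List.nil_append]
  rw [show ((fun i => wordA msg i) ∘ fun k : Nat => (0 : Int) + 4 * (k : Int))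
      = (fun j : Nat => wordA msg ((4 * (0 + j) : Nat) : Int)) from by
    funext j; simp only [Function.comp]; congr 1; push_cast; ring]
  exact lemA_gen msg msg.toList 0 (by simp)

theorem lemB (cs : List Char) (acc : List Int) (i0 : Nat) (h : i0 % 4 = 0) :
    (let st := cs.foldl
        (fun (st : List Int × Int × Nat) c =>
          let word := PySem.Int.bor st.2.1 (((c.toNat : Int)) <<< (8 * (st.2.2 % 4)))
          if st.2.2 % 4 == 3 then (st.1 ++ [word], 0, st.2.2 + 1) else (st.1, word, st.2.2 + 1))
        (acc, 0, i0);
     if cs.length % 4 ≠ 0 then st.1 ++ [st.2.1] else st.1) = acc ++ pvChunks cs := by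
  induction cs using pvChunks.induct generalizing acc i0 with
  | case1 => simp [pvChunks]
  | case2 a b c d rest ih =>
      have m1 : (i0 + 1) % 4 = 1 := by omega
      have m2 : (i0 + 2) % 4 = 2 := by omega
      have m3 : (i0 + 3) % 4 = 3 := by omega
      rw [show (a :: b :: c :: d :: rest).length % 4 = rest.length % 4 by simp; omega]
      simp only [List.foldl_cons]
      simp [h, m1, m2, m3, PySem.Int.bor_comm 0, pvChunks]
      have H := ih (acc ++ [PySem.Int.bor
          (PySem.Int.bor (PySem.Int.bor ((a.toNat : Int)) ((b.toNat : Int) <<< (8 : Nat)))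
            ((c.toNat : Int) <<< (16 : Nat)))
          ((d.toNat : Int) <<< (24 : Nat))]) (i0 + 1 + 1 + 1 + 1) (by omega)
      simpa [pvChunks] using H
  | case3 a =>
      simp [pvChunks, h, PySem.Int.bor_comm 0]
  | case4 a b =>
      have m1 : (i0 + 1) % 4 = 1 := by omega
      simp [m1, pvChunks, h, PySem.Int.bor_comm 0]
  | case5 a b c =>
      have m1 : (i0 + 1) % 4 = 1 := by omega
      have m2 : (i0 + 2) % 4 = 2 := by omega
      simp [m1, m2, pvChunks, h, PySem.Int.bor_comm 0]

-- ===== VERDICT (by name: the statement is the Claim_ definition above) =====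
theorem sencode_spec : Claim_equal_sencode := by
  intro msg key _
  unfold Spec_sencode sencode sencode_alt
  have hA := lemA msg
  have hB := lemB msg.toList [] 0 rfl
  simp only at hA hB ⊢
  rw [hA, hB]
  simp
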